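-- pv_equiv track=rewrite | github.com/prabowo02/toki-regular-open-contest | troc-15/troc-15-jumps/solution-prabowo.py | solve_large
-- ===== SOURCE A (Python) =====
-- def solve_large(N, M):
--     cur, ans, step = 0, '', 0
--     if M & 1:
--         step += 1
--         cur += 1
--         ans += 'R'
--
--     while cur + 4*step + 4 <= M:
--         cur += 4*step + 4
--         step += 2
--         ans += 'RR'
--
--     while cur < M:
--         cur += 2
--         ans += 'LR'
--
--     return ans
-- ===== SOURCE B (Python) =====
-- def _isqrt(n):
--     # floor square root by the classic digit recurrence (O(log n) recursion):
--     # isqrt(n) is 2*isqrt(n//4), possibly plus one.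
--     if n < 2:
--         return n
--     r = 2 * _isqrt(n // 4)
--     return r + 1 if (r + 1) * (r + 1) <= n else r
--
-- def solve_large(N, M):
--     b = M & 1
--     r = _isqrt(M) if M > 0 else 0
--     if (r & 1) != b:
--         r -= 1
--     return 'R' * b + 'RR' * ((r - b) // 2) + 'LR' * ((M - r * r) // 2)
-- ===== Notes on version B (the rewrite author's own statement) =====
-- stated objective: alternative
-- what changed: B replaces A's jump-by-jump O(sqrt(M))-iteration string accumulation by computing floor(sqrt(M)) with the recursive digit doubling recurrence isqrt(n)=2*isqrt(n//4)(+1) in O(log M) steps, adjusting its parity to M's, and emitting the answer as three closed-form string repetitions.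
import Mathlib
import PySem

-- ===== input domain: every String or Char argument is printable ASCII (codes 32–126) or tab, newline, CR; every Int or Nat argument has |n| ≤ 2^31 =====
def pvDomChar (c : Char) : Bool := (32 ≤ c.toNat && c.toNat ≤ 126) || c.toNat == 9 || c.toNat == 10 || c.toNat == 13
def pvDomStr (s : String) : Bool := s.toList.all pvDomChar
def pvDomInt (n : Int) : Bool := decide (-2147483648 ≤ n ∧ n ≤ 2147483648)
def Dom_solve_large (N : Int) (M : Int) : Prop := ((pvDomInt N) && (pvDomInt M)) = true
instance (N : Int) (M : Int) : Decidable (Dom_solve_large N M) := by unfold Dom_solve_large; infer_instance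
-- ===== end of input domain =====

-- B computes floor(sqrt(M)) by the recursive digit recurrence isqrt(n)=2*isqrt(n//4)(+1),
-- parity-adjusts it to M, and emits the answer as three string repetitions; A accumulates
-- the string jump by jump. Objective: alternative algorithm (isqrt recursion vs scan).

-- ===== PORT A =====
-- 'while cur + 4*step + 4 <= M: cur += 4*step + 4; step += 2; ans += "RR"'
-- (fuel is a totality guard only: solve_large passes enough for the loop to finish)
def solveLoopRR : Nat → Int → Int → Int → List Char → Int × List Char
  | 0, _, cur, _, ans => (cur, ans)
  | fuel + 1, M, cur, step, ans =>
    if cur + 4 * step + 4 ≤ M then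
      solveLoopRR fuel M (cur + 4 * step + 4) (step + 2) (ans ++ ['R', 'R'])
    else (cur, ans)

-- 'while cur < M: cur += 2; ans += "LR"'  (fuel is a totality guard only)
def solveLoopLR : Nat → Int → Int → List Char → List Char
  | 0, _, _, ans => ans
  | fuel + 1, M, cur, ans =>
    if cur < M then solveLoopLR fuel M (cur + 2) (ans ++ ['L', 'R'])
    else ans

def solve_large (N : Int) (M : Int) : String :=
  -- 'if M & 1: step += 1; cur += 1; ans += "R"'  (truthiness of M & 1 = ≠ 0)
  let init : Int × Int × List Char :=
    if PySem.Int.band M 1 ≠ 0 then (1, 1, ['R']) else (0, 0, [])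
  let res := solveLoopRR (M.toNat + 1) M init.1 init.2.1 init.2.2
  String.mk (solveLoopLR (M.toNat + 1) M res.1 res.2)

-- ===== PORT B =====
-- '_isqrt(n)': if n < 2: return n; r = 2*_isqrt(n // 4); return r+1 if (r+1)**2 <= n else r
-- (fuel is a totality guard only: isqrtI passes enough for the recursion to bottom out)
def isqrtIF : Nat → Int → Int
  | 0, n => n
  | fuel + 1, n =>
    if n < 2 then n
    else
      let r := 2 * isqrtIF fuel (PySem.Int.floordiv n 4)
      if (r + 1) * (r + 1) ≤ n then r + 1 else r

def isqrtI (n : Int) : Int := isqrtIF (n.toNat + 1) n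

-- "b = M & 1; r = _isqrt(M) if M > 0 else 0; if (r & 1) != b: r -= 1;
--  return 'R'*b + 'RR'*((r-b)//2) + 'LR'*((M-r*r)//2)"
def solve_large_alt (N : Int) (M : Int) : String :=
  let b := PySem.Int.band M 1
  let r0 := if 0 < M then isqrtI M else 0
  let r := if PySem.Int.band r0 1 ≠ b then r0 - 1 else r0
  String.mk (PySem.List.pyRepeat ['R'] b
    ++ PySem.List.pyRepeat ['R', 'R'] (PySem.Int.floordiv (r - b) 2)
    ++ PySem.List.pyRepeat ['L', 'R'] (PySem.Int.floordiv (M - r * r) 2))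

-- ===== PRECONDITION & SPEC =====
def Spec_solve_large (N : Int) (M : Int) (out : String) : Prop := out = solve_large_alt N M
instance (N : Int) (M : Int) (out : String) : Decidable (Spec_solve_large N M out) := by unfold Spec_solve_large; infer_instance

-- ===== CLAIM =====
def Claim_equal_solve_large : Prop := ∀ (N : Int) (M : Int), Dom_solve_large N M → Spec_solve_large N M (solve_large N M)

-- ===== LEMMAS AND PROOFS =====

theorem pyRepeat_nonpos {α : Type} (xs : List α) (k : Int) (hk : k ≤ 0) :
    PySem.List.pyRepeat xs k = [] := by
  unfold PySem.List.pyRepeat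
  have : k.toNat = 0 := by omega
  simp [this]

theorem pyRepeat_succ {α : Type} (xs : List α) (k : Int) (hk : 0 ≤ k) :
    PySem.List.pyRepeat xs (k + 1) = xs ++ PySem.List.pyRepeat xs k := by
  unfold PySem.List.pyRepeat
  have : (k + 1).toNat = k.toNat + 1 := by omega
  simp [this, List.replicate_succ]

-- proof-only helper: the value A's RR loop drives its step variable to
def findR (M : Int) (r : Int) : Int :=
  if _h : 0 ≤ r ∧ (r + 2) * (r + 2) ≤ M then findR M (r + 2)
  else r
termination_by (M - r * r).toNat
decreasing_by
  have : (r + 2) * (r + 2) = r * r + 4 * r + 4 := by ring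
  omega

-- findR only ever adds 2: the result is the start plus an even natural amount.
theorem findR_add_two_nat (M : Int) (r : Int) : ∃ k : Nat, findR M r = r + 2 * k := by
  fun_induction findR M r with
  | case1 r h ih =>
      obtain ⟨k, hk⟩ := ih
      exact ⟨k + 1, by rw [hk]; push_cast; ring⟩
  | case2 r h => exact ⟨0, by simp⟩

-- characterisation of findR on a valid start (0 ≤ b, b² ≤ M)
theorem findR_spec (M b : Int) (hb : 0 ≤ b) (hbb : b * b ≤ M) :
    b ≤ findR M b ∧ findR M b * findR M b ≤ M ∧
      M < (findR M b + 2) * (findR M b + 2) ∧ (findR M b - b) % 2 = 0 := by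
  fun_induction findR M b with
  | case1 r h ih =>
      obtain ⟨h1, h2, h3, h4⟩ := ih (by omega) h.2
      exact ⟨by omega, h2, h3, by omega⟩
  | case2 r h =>
      refine ⟨le_rfl, hbb, ?_, by omega⟩
      by_contra hc
      exact h ⟨hb, by omega⟩

-- uniqueness: two same-parity nonnegative x with x² ≤ M < (x+2)² coincide
theorem sq_unique (M x y : Int) (hx0 : 0 ≤ x) (hy0 : 0 ≤ y) (hpar : (x - y) % 2 = 0)
    (hx : x * x ≤ M) (hx2 : M < (x + 2) * (x + 2))
    (hy : y * y ≤ M) (hy2 : M < (y + 2) * (y + 2)) : x = y := by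
  rcases lt_trichotomy x y with h | h | h
  · exfalso
    have hle : x + 2 ≤ y := by omega
    nlinarith
  · exact h
  · exfalso
    have hle : y + 2 ≤ x := by omega
    nlinarith

-- with enough fuel, isqrtIF is the floor square root on nonnegative input
theorem isqrtIF_spec (fuel : Nat) (n : Int) (hf : n.toNat < fuel) (hn : 0 ≤ n) :
    0 ≤ isqrtIF fuel n ∧ isqrtIF fuel n * isqrtIF fuel n ≤ n ∧
      n < (isqrtIF fuel n + 1) * (isqrtIF fuel n + 1) := by
  induction fuel generalizing n with
  | zero => omega
  | succ f ih =>
      by_cases h2 : n < 2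
      · have hn01 : n = 0 ∨ n = 1 := by omega
        rcases hn01 with h0 | h0 <;> subst h0 <;> simp [isqrtIF]
      · have hq : PySem.Int.floordiv n 4 = n / 4 :=
          PySem.Int.floordiv_eq_ediv_of_pos (by norm_num)
        have hf' : (n / 4).toNat < f := by omega
        obtain ⟨s0, s1, s2⟩ := ih (n / 4) hf' (by omega)
        have hmod : n = 4 * (n / 4) + n % 4 := by omega
        have hm1 : 0 ≤ n % 4 := Int.emod_nonneg n (by norm_num)
        have hm2 : n % 4 < 4 := Int.emod_lt_of_pos n (by norm_num)
        set s := isqrtIF f (n / 4) with hs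
        simp only [isqrtIF, if_neg h2, hq, ← hs]
        by_cases hup : (2 * s + 1) * (2 * s + 1) ≤ n
        · rw [if_pos hup]
          refine ⟨by linarith, hup, ?_⟩
          have hx : (2 * s + 1 + 1) * (2 * s + 1 + 1) = 4 * ((s + 1) * (s + 1)) := by ring
          linarith
        · rw [if_neg hup]
          have hx : (2 * s) * (2 * s) = 4 * (s * s) := by ring
          exact ⟨by linarith, by linarith, by linarith⟩

theorem isqrtI_spec (n : Int) (hn : 0 ≤ n) :
    0 ≤ isqrtI n ∧ isqrtI n * isqrtI n ≤ n ∧ n < (isqrtI n + 1) * (isqrtI n + 1) :=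
  isqrtIF_spec (n.toNat + 1) n (by omega) hn

-- with enough fuel, the RR loop started at (s*s, s) lands at ((findR M s)², …)
-- having appended one 'RR' per step of findR
theorem loopRR_eq (M : Int) (s : Int) (ans : List Char) (fuel : Nat)
    (hs : 0 ≤ s) (hf : (M - s * s).toNat < fuel) :
    solveLoopRR fuel M (s * s) s ans =
      ((findR M s) * (findR M s),
       ans ++ PySem.List.pyRepeat ['R', 'R'] (PySem.Int.floordiv (findR M s - s) 2)) := by
  fun_induction findR M s generalizing ans fuel with
  | case1 s h ih =>
      obtain ⟨f, rfl⟩ : ∃ f, fuel = f + 1 := ⟨fuel - 1, by omega⟩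
      have hsq : s * s + 4 * s + 4 = (s + 2) * (s + 2) := by ring
      rw [solveLoopRR, if_pos (by nlinarith [h.1, h.2]), hsq]
      have hf' : (M - (s + 2) * (s + 2)).toNat < f := by
        have h4 : (s + 2) * (s + 2) = s * s + 4 * s + 4 := by ring
        omega
      rw [ih (ans ++ ['R', 'R']) f (by omega) hf']
      obtain ⟨k, hk⟩ := findR_add_two_nat M (s + 2)
      have h1 : PySem.Int.floordiv (findR M (s + 2) - (s + 2)) 2 = (k : Int) := by
        rw [hk, PySem.Int.floordiv_eq_ediv_of_pos (by omega)]; omega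
      have h2 : PySem.Int.floordiv (findR M (s + 2) - s) 2 = (k : Int) + 1 := by
        rw [hk, PySem.Int.floordiv_eq_ediv_of_pos (by omega)]; omega
      rw [h1, h2, pyRepeat_succ _ _ (by omega)]
      simp
  | case2 s h =>
      have hcond : ¬ s * s + 4 * s + 4 ≤ M := by
        intro hc
        exact h ⟨hs, by nlinarith⟩
      obtain ⟨f, rfl⟩ : ∃ f, fuel = f + 1 := ⟨fuel - 1, by omega⟩
      rw [solveLoopRR, if_neg hcond]
      simp [pyRepeat_nonpos _ (0 : Int) le_rfl]

-- with enough fuel, the LR loop appends (M - cur) // 2 copies of 'LR' when M - cur is even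
theorem loopLR_eq (M : Int) (cur : Int) (ans : List Char) (fuel : Nat)
    (hdvd : 2 ∣ (M - cur)) (hf : (M - cur).toNat < fuel) :
    solveLoopLR fuel M cur ans =
      ans ++ PySem.List.pyRepeat ['L', 'R'] (PySem.Int.floordiv (M - cur) 2) := by
  induction fuel generalizing cur ans with
  | zero => omega
  | succ f ih =>
      by_cases hlt : cur < M
      · obtain ⟨q, hq⟩ := hdvd
        rw [solveLoopLR, if_pos hlt, ih (cur + 2) (ans ++ ['L', 'R']) (by omega) (by omega)]
        have h1 : PySem.Int.floordiv (M - (cur + 2)) 2 = q - 1 := by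
          rw [PySem.Int.floordiv_eq_ediv_of_pos (by omega)]; omega
        have h2 : PySem.Int.floordiv (M - cur) 2 = q := by
          rw [PySem.Int.floordiv_eq_ediv_of_pos (by omega)]; omega
        rw [h1, h2, show q = (q - 1) + 1 from by ring, pyRepeat_succ _ _ (by omega)]
        simp
      · rw [solveLoopLR, if_neg hlt]
        have h0 : PySem.Int.floordiv (M - cur) 2 ≤ 0 := by
          rw [PySem.Int.floordiv_eq_ediv_of_pos (by omega)]; omega
        rw [pyRepeat_nonpos _ _ h0]
        simp

-- A's output, expressed through findR
theorem solve_large_eq_findR (N M : Int) :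
    solve_large N M =
      String.mk (PySem.List.pyRepeat ['R'] (PySem.Int.band M 1)
        ++ PySem.List.pyRepeat ['R', 'R']
            (PySem.Int.floordiv (findR M (PySem.Int.band M 1) - PySem.Int.band M 1) 2)
        ++ PySem.List.pyRepeat ['L', 'R']
            (PySem.Int.floordiv
              (M - findR M (PySem.Int.band M 1) * findR M (PySem.Int.band M 1)) 2)) := by
  have hb : PySem.Int.band M 1 = M % 2 := by
    rw [PySem.Int.band_one, PySem.Int.mod_eq_emod_of_pos (by omega)]
  unfold solve_large
  rcases Int.emod_two_eq_zero_or_one M with h | h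
  · have hb0 : PySem.Int.band M 1 = 0 := by rw [hb, h]
    rw [hb0]
    simp only [ne_eq, not_true_eq_false, ite_false]
    obtain ⟨k, hk⟩ := findR_add_two_nat M 0
    have hRR : solveLoopRR (M.toNat + 1) M 0 0 [] =
        (findR M 0 * findR M 0,
         [] ++ PySem.List.pyRepeat ['R', 'R'] (PySem.Int.floordiv (findR M 0 - 0) 2)) := by
      simpa using loopRR_eq M 0 [] (M.toNat + 1) le_rfl (by omega)
    have hsq : findR M 0 * findR M 0 = 4 * (k * k) := by rw [hk]; ring
    have hdvd : 2 ∣ (M - findR M 0 * findR M 0) := by omega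
    rw [hRR, loopLR_eq _ _ _ _ hdvd
      (by have hkk := mul_self_nonneg ((k : Int)); omega)]
    simp
  · have hb1 : PySem.Int.band M 1 = 1 := by rw [hb, h]
    rw [hb1]
    simp only [ne_eq, one_ne_zero, not_false_eq_true, if_pos]
    obtain ⟨k, hk⟩ := findR_add_two_nat M 1
    have hRR : solveLoopRR (M.toNat + 1) M 1 1 ['R'] =
        (findR M 1 * findR M 1,
         ['R'] ++ PySem.List.pyRepeat ['R', 'R'] (PySem.Int.floordiv (findR M 1 - 1) 2)) := by
      simpa using loopRR_eq M 1 ['R'] (M.toNat + 1) (by omega) (by omega)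
    have hsq : findR M 1 * findR M 1 = 4 * (k * k) + 4 * k + 1 := by rw [hk]; ring
    have hdvd : 2 ∣ (M - findR M 1 * findR M 1) := by omega
    rw [hRR, loopLR_eq _ _ _ _ hdvd
      (by have hkk := mul_self_nonneg ((k : Int)); omega)]
    have hR1 : PySem.List.pyRepeat ['R'] 1 = ['R'] := by decide
    rw [hR1]

-- B's parity-adjusted isqrt equals findR for positive M
theorem alt_r_eq_findR (M : Int) (hM : 0 < M) :
    (if PySem.Int.band (isqrtI M) 1 ≠ PySem.Int.band M 1 then isqrtI M - 1 else isqrtI M)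
      = findR M (PySem.Int.band M 1) := by
  have hb : PySem.Int.band M 1 = M % 2 := by
    rw [PySem.Int.band_one, PySem.Int.mod_eq_emod_of_pos (by omega)]
  obtain ⟨s0, s1, s2⟩ := isqrtI_spec M (by omega)
  set s := isqrtI M with hs
  have hbs : PySem.Int.band s 1 = s % 2 := by
    rw [PySem.Int.band_one, PySem.Int.mod_eq_emod_of_pos (by omega)]
  have hs1 : 1 ≤ s := by
    by_contra hc
    have : s = 0 := by omega
    rw [this] at s2; omega
  set b := PySem.Int.band M 1 with hbdef
  have hbM : b = M % 2 := hb
  have hbbM : b * b ≤ M := by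
    rcases Int.emod_two_eq_zero_or_one M with h | h <;> rw [hbM, h] <;> omega
  obtain ⟨f1, f2, f3, f4⟩ := findR_spec M b (by omega) hbbM
  set r := if PySem.Int.band s 1 ≠ b then s - 1 else s with hr
  have hr0 : 0 ≤ r := by
    rw [hr]; split <;> omega
  have hrsq : r * r ≤ M := by
    rw [hr]; split
    · nlinarith
    · exact s1
  have hrnext : M < (r + 2) * (r + 2) := by
    have hle : s + 1 ≤ r + 2 := by rw [hr]; split <;> omega
    nlinarith
  have hrpar : (r - b) % 2 = 0 := by
    rw [hr, hbs]
    have hsm : s % 2 = 0 ∨ s % 2 = 1 := Int.emod_two_eq_zero_or_one s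
    split <;> rename_i hcond <;> omega
  exact sq_unique M r (findR M b) hr0 (by omega) (by omega) hrsq hrnext f2 f3

theorem solve_large_eq_alt (N M : Int) : solve_large N M = solve_large_alt N M := by
  rw [solve_large_eq_findR N M]
  unfold solve_large_alt
  by_cases hM : 0 < M
  · simp only [hM, if_pos]
    rw [alt_r_eq_findR M hM]
  · -- M ≤ 0: findR returns its start b ∈ {0,1}; B uses r0 = 0
    have hb : PySem.Int.band M 1 = M % 2 := by
      rw [PySem.Int.band_one, PySem.Int.mod_eq_emod_of_pos (by omega)]
    simp only [hM, ite_false]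
    rcases Int.emod_two_eq_zero_or_one M with h | h
    · have hb0 : PySem.Int.band M 1 = 0 := by rw [hb, h]
      have hf : findR M 0 = 0 := by
        rw [findR, dif_neg]; rintro ⟨-, hc⟩; omega
      rw [hb0, hf]
      have h01 : PySem.Int.band (0 : Int) 1 = 0 := by decide
      simp [h01]
    · have hb1 : PySem.Int.band M 1 = 1 := by rw [hb, h]
      have hf : findR M 1 = 1 := by
        rw [findR, dif_neg]; rintro ⟨-, hc⟩; omega
      rw [hb1, hf]
      have h01 : PySem.Int.band (0 : Int) 1 = 0 := by decide
      rw [h01]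
      simp only [ne_eq, zero_ne_one, not_false_eq_true, if_pos]
      -- r = -1 on B's side: both RR and LR repetition counts agree
      have e1 : PySem.Int.floordiv ((1 : Int) - 1) 2 = 0 := by decide
      have e2 : PySem.Int.floordiv ((0 : Int) - 1 - 1) 2 = -1 := by decide
      rw [e1, e2, pyRepeat_nonpos _ (0 : Int) le_rfl, pyRepeat_nonpos _ (-1 : Int) (by omega)]
      norm_num

-- ===== VERDICT =====
theorem solve_large_spec : Claim_equal_solve_large := by
  intro N M _
  unfold Spec_solve_large
  exact solve_large_eq_alt N M
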